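-- pv_equiv track=rewrite | github.com/caelum1125/CSE476Final | solver_agent.py | _sc_vote_future
-- ===== SOURCE A (Python) =====
-- from collections import Counter, defaultdict, deque
--
-- def _sc_vote_future(answers: list) -> str:
--     """Majority vote for future prediction answers."""
--     if not answers:
--         return ""
--     normalized = [a.lower().strip() for a in answers]
--     winner = Counter(normalized).most_common(1)[0][0]
--     for a in answers:
--         if a.lower().strip() == winner:
--             return a
--     return answers[0]
-- ===== SOURCE B (Python) =====
-- def _sc_vote_future(answers: list) -> str:
--     """Majority vote for future prediction answers, dictionary-free: scan the
--     answers once keeping the first answer whose normalized form is a strictly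
--     new most-frequent key (count computed by a direct nested scan)."""
--     if not answers:
--         return ""
--     best = ""
--     best_n = 0
--     for a in answers:
--         k = a.lower().strip()
--         n = sum(1 for x in answers if x.lower().strip() == k)
--         if best_n < n:
--             best, best_n = a, n
--     return best
-- ===== Notes on version B (the rewrite author's own statement) =====
-- stated objective: alternative
-- what changed: Drops Counter/dicts entirely: a single record-keeping scan over the original answers keeps the first answer whose normalized key reaches a strictly new maximum count, with each count obtained by a direct nested scan (brute-force argmax instead of hash tally + most_common + rescan).
import Mathlib
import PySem

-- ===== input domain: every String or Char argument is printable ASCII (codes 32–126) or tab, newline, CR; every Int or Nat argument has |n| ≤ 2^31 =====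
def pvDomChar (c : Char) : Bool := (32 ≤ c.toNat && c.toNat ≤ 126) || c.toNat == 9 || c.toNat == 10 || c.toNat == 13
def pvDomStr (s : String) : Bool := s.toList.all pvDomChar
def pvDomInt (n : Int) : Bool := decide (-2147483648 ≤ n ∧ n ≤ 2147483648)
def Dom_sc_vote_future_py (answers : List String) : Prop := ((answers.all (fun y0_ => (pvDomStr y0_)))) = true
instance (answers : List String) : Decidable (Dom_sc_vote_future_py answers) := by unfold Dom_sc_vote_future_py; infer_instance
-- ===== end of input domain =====

-- B drops Counter/dicts entirely: one record-keeping scan keeps the first answer whose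
-- normalized key reaches a strictly new maximum count, counts by a direct nested scan (objective: alternative).

-- norm a = a.lower().strip(), shared by both ports
def pvNorm (a : String) : String := PySem.Str.strip (PySem.Str.lower a)

-- ===== PORT A =====
-- Counter(normalized).most_common(1)[0][0] = first key of maximal count in insertion order
-- (most_common is stable) = PySem.List.max? over the counter's items (first extremal).
def sc_vote_future_py (answers : List String) : String :=
  if answers.isEmpty then ""
  else
    let normalized := answers.map (fun a => pvNorm a)
    let winner :=
      match PySem.List.max? (PySem.Dict.counter normalized).items (fun p => p.2) with
      | some p => p.1
      | none => ""   -- unreachable: the counter of a nonempty list is nonempty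
    match answers.find? (fun a => pvNorm a == winner) with
    | some a => a
    | none => answers.headD ""   -- return answers[0]

-- ===== PORT B =====
-- the single Python loop carries (best, best_n); n is the inner full scan, ported as countP
def sc_vote_future_py_alt (answers : List String) : String :=
  if answers.isEmpty then ""
  else
    (answers.foldl
      (fun (acc : String × Int) a =>
        if acc.2 < ((answers.countP (fun x => pvNorm x == pvNorm a) : Nat) : Int) then
          (a, ((answers.countP (fun x => pvNorm x == pvNorm a) : Nat) : Int))
        else acc)
      ("", 0)).1

-- ===== PRECONDITION & SPEC =====
def Spec_sc_vote_future_py (answers : List String) (out : String) : Prop := out = sc_vote_future_py_alt answers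
instance (answers : List String) (out : String) : Decidable (Spec_sc_vote_future_py answers out) := by unfold Spec_sc_vote_future_py; infer_instance

-- ===== CLAIM (what is proved, stated in full; the proofs are below) =====
def Claim_equal_sc_vote_future_py : Prop := ∀ (answers : List String), Dom_sc_vote_future_py answers → Spec_sc_vote_future_py answers (sc_vote_future_py answers)

-- ===== LEMMAS AND PROOFS =====

-- running maximum of g over t, seeded with c
def pvMv {α : Type} (g : α → Int) (c : Int) (t : List α) : Int :=
  t.foldl (fun m a => max m (g a)) c

theorem pvMv_init {α : Type} (g : α → Int) (c : Int) (t : List α) : c ≤ pvMv g c t := by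
  induction t generalizing c with
  | nil => exact le_refl c
  | cons a t ih => exact le_trans (le_max_left c (g a)) (ih _)

theorem pvMv_le_of_mem {α : Type} (g : α → Int) {t : List α} {a : α} (h : a ∈ t) :
    ∀ c, g a ≤ pvMv g c t := by
  induction h with
  | head as =>
    intro c
    exact le_trans (le_max_right c (g a)) (pvMv_init g _ as)
  | tail b hmem ih =>
    intro c
    exact ih _

theorem pvMv_attains {α : Type} (g : α → Int) (c : Int) (t : List α) :
    pvMv g c t = c ∨ ∃ a ∈ t, pvMv g c t = g a := by
  induction t generalizing c with
  | nil => exact Or.inl rfl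
  | cons b t ih =>
    rcases ih (max c (g b)) with h | ⟨a, ha, h⟩
    · rcases max_cases c (g b) with ⟨h1, _⟩ | ⟨h1, _⟩
      · exact Or.inl (by simpa [pvMv, h1] using h)
      · exact Or.inr ⟨b, List.mem_cons_self, by simpa [pvMv, h1] using h⟩
    · exact Or.inr ⟨a, List.mem_cons_of_mem _ ha, h⟩

-- find? is determined by the predicate's values on members
theorem pvFind?_congr {α : Type} {p q : α → Bool} {t : List α}
    (h : ∀ x ∈ t, p x = q x) : t.find? p = t.find? q := by
  induction t with
  | nil => rfl
  | cons a t ih =>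
    have ha := h a List.mem_cons_self
    simp only [List.find?_cons, ← ha]
    cases hp : p a
    · exact ih (fun x hx => h x (List.mem_cons_of_mem _ hx))
    · rfl

-- if find? p hits b and q implies p on members, and q b holds, then find? q also hits b
theorem pvFind?_strengthen {α : Type} {p q : α → Bool} {t : List α} {b : α}
    (hb : t.find? p = some b) (himp : ∀ x ∈ t, q x = true → p x = true)
    (hqb : q b = true) : t.find? q = some b := by
  induction t with
  | nil => simp at hb
  | cons a t ih =>
    simp only [List.find?_cons] at hb ⊢
    cases hp : p a
    · have hqa : q a = false := by
        cases hq : q a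
        · rfl
        · exact absurd (himp a List.mem_cons_self hq) (by simp [hp])
      rw [hp] at hb
      simp only [hqa]
      exact ih (by simpa using hb) (fun x hx => himp x (List.mem_cons_of_mem _ hx))
    · rw [hp] at hb
      simp only [Option.some.injEq] at hb
      subst hb
      simp [hqb]

-- the record-keeping fold finds the first element whose g-value strictly beats c and is the running max
theorem pvFoldRecord {α : Type} (g : α → Int) (t : List α) (s : α) (c : Int) :
    t.foldl (fun (acc : α × Int) a => if acc.2 < g a then (a, g a) else acc) (s, c)
    = (t.find? (fun a => decide (c < g a) && (g a == pvMv g c t))).elim (s, c) (fun w => (w, g w)) := by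
  induction t generalizing s c with
  | nil => rfl
  | cons a t ih =>
    have hMv : pvMv g c (a :: t) = pvMv g (max c (g a)) t := rfl
    by_cases hc : c < g a
    · have hmax : max c (g a) = g a := by omega
      rw [List.foldl_cons]
      simp only [if_pos hc]
      rw [ih a (g a)]
      by_cases hm : g a = pvMv g (g a) t
      · have hfalse : t.find? (fun x => decide (g a < g x) && (g x == pvMv g (g a) t)) = none := by
          rw [List.find?_eq_none]
          intro x _
          by_cases hx : g x = pvMv g (g a) t
          · have hnx : ¬ (g a < g x) := by omega
            simp [hnx]
          · simp [hx]
        have hpa : (decide (c < g a) && (g a == pvMv g c (a :: t))) = true := by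
          rw [hMv, hmax]
          simp [hc, ← hm]
        have hsome : (a :: t).find? (fun x => decide (c < g x) && (g x == pvMv g c (a :: t)))
            = some a := by
          rw [List.find?_cons]
          simp [hpa]
        rw [hfalse, hsome]
        rfl
      · have hlt : g a < pvMv g (g a) t :=
          lt_of_le_of_ne (pvMv_init g (g a) t) hm
        have hpa : (decide (c < g a) && (g a == pvMv g c (a :: t))) = false := by
          rw [hMv, hmax]
          simp [hm]
        have hskip : (a :: t).find? (fun x => decide (c < g x) && (g x == pvMv g c (a :: t)))
            = t.find? (fun x => decide (c < g x) && (g x == pvMv g c (a :: t))) := by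
          rw [List.find?_cons]
          simp [hpa]
        rw [hskip]
        have hcong : t.find? (fun x => decide (g a < g x) && (g x == pvMv g (g a) t))
            = t.find? (fun x => decide (c < g x) && (g x == pvMv g c (a :: t))) := by
          apply pvFind?_congr
          intro x _
          rw [hMv, hmax]
          by_cases hx : g x = pvMv g (g a) t
          · have h1 : g a < g x := by omega
            have h2 : c < g x := by omega
            simp [h1, h2]
          · have hfx : (g x == pvMv g (g a) t) = false := beq_eq_false_iff_ne.mpr hx
            rw [hfx]
            simp
        rw [hcong]
        have hex : ∃ x ∈ t, (decide (c < g x) && (g x == pvMv g c (a :: t))) = true := by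
          rcases pvMv_attains g (g a) t with h0 | ⟨x, hx, hxe⟩
          · exact absurd h0.symm hm
          · refine ⟨x, hx, ?_⟩
            rw [hMv, hmax]
            have h2 : c < g x := by omega
            simp [h2, hxe]
        obtain ⟨w, hw⟩ := Option.isSome_iff_exists.mp (List.find?_isSome.mpr hex)
        rw [hw]
        rfl
    · have hmax : max c (g a) = c := by omega
      rw [List.foldl_cons]
      simp only [if_neg hc]
      rw [ih s c]
      have hpa : (decide (c < g a) && (g a == pvMv g c (a :: t))) = false := by
        simp [hc]
      have hskip : (a :: t).find? (fun x => decide (c < g x) && (g x == pvMv g c (a :: t)))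
          = t.find? (fun x => decide (c < g x) && (g x == pvMv g c (a :: t))) := by
        rw [List.find?_cons]
        simp [hpa]
      rw [hskip]
      have heq : pvMv g c (a :: t) = pvMv g c t := by rw [hMv, hmax]
      simp only [heq]

-- A's max? on a nonempty items list is the strict-max fold (first extremal kept)
theorem pvMaxCons (x0 : String × Int) (t : List (String × Int)) :
    PySem.List.max? (x0 :: t) (fun p => p.2)
    = some (t.foldl (fun mm p => if mm.2 < p.2 then p else mm) x0) := by
  unfold PySem.List.max?
  simp only [List.foldl_cons]
  induction t generalizing x0 with
  | nil => rfl
  | cons p tt ih =>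
    simp only [List.foldl_cons]
    by_cases h : x0.2 < p.2 <;> simp [h, ih]

-- find? over a set built by repeated add: first match in the accumulator, else first match in the fed list
theorem pvFind?_foldl_add (q : String → Bool) (L : List String) (s : List String) :
    (L.foldl PySem.Set.add s).find? q = (s.find? q).or (L.find? q) := by
  induction L generalizing s with
  | nil => cases h : s.find? q <;> simp [h]
  | cons k L ih =>
    rw [List.foldl_cons, List.find?_cons]
    by_cases hk : PySem.Set.contains s k
    · have hadd : PySem.Set.add s k = s := by
        unfold PySem.Set.add
        rw [if_pos hk]
      rw [hadd, ih s]
      cases hq : q k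
      · rfl
      · have hex : ∃ x ∈ s, q x = true := by
          refine ⟨k, ?_, hq⟩
          simpa [PySem.Set.contains] using hk
        obtain ⟨w, hw⟩ := Option.isSome_iff_exists.mp (List.find?_isSome.mpr hex)
        simp [hw]
    · have hadd : PySem.Set.add s k = s ++ [k] := by
        unfold PySem.Set.add
        rw [if_neg hk]
      rw [hadd, ih (s ++ [k]), List.find?_append]
      cases hs : s.find? q
      · cases hq : q k <;> simp [hq]
      · simp

-- the strict-max fold over pairs (k, h k) is the record fold over the keys
theorem pvMaxFold_map (h : String → Int) (ks : List String) (k0 : String) (c0 : Int) :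
    (ks.map (fun k => (k, h k))).foldl (fun mm p => if mm.2 < p.2 then p else mm) (k0, c0)
    = ks.foldl (fun (acc : String × Int) k => if acc.2 < h k then (k, h k) else acc) (k0, c0) := by
  rw [List.foldl_map]

-- ===== VERDICT (by name: the statement is the Claim_ definition above) =====
set_option maxHeartbeats 1000000 in
theorem sc_vote_future_py_spec : Claim_equal_sc_vote_future_py := by
  intro answers _
  unfold Spec_sc_vote_future_py sc_vote_future_py sc_vote_future_py_alt
  generalize pvNorm = f
  by_cases hne : answers.isEmpty
  · simp [hne]
  · simp only [hne, Bool.false_eq_true, if_false]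
    obtain ⟨a0, rest, rfl⟩ : ∃ a0 rest, answers = a0 :: rest := by
      cases answers with
      | nil => simp at hne
      | cons a0 rest => exact ⟨a0, rest, rfl⟩
    set l := a0 :: rest with hl
    set h : String → Int := fun k => (((l.map f).count k : Nat) : Int) with hh
    have hcount : ∀ a : String, ((l.countP (fun x => f x == f a) : Nat) : Int) = h (f a) := by
      intro a
      have : l.countP (fun x => f x == f a) = (l.map f).count (f a) := by
        rw [List.count_eq_countP, List.countP_map]
        rfl
      rw [this]
    -- B's loop body, rewritten through the count of the normalized list
    have hfun : (fun (acc : String × Int) (a : String) =>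
          if acc.2 < ((l.countP (fun x => f x == f a) : Nat) : Int) then
            (a, ((l.countP (fun x => f x == f a) : Nat) : Int)) else acc)
        = (fun (acc : String × Int) (a : String) =>
          if acc.2 < h (f a) then (a, h (f a)) else acc) := by
      funext acc a
      rw [hcount a]
    -- counts of members are positive
    have hpos : ∀ a ∈ l, (0:Int) < h (f a) := by
      intro a ha
      have hmem : f a ∈ l.map f := List.mem_map_of_mem ha
      have := List.count_pos_iff.mpr hmem
      simp only [hh]
      exact_mod_cast this
    set M : Int := pvMv (fun a => h (f a)) 0 l with hM
    have hBfind :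
        l.find? (fun a => decide ((0:Int) < h (f a)) && (h (f a) == pvMv (fun a => h (f a)) 0 l))
        = l.find? (fun a => h (f a) == M) := by
      apply pvFind?_congr
      intro x hx
      simp [hpos x hx, hM]
    -- M is attained on l, so the find? succeeds: astar is B's result
    have hMattain : ∃ a ∈ l, h (f a) = M := by
      rcases pvMv_attains (fun a => h (f a)) 0 l with h0 | ⟨a, ha, hae⟩
      · exfalso
        have hp0 := hpos a0 List.mem_cons_self
        have h1 := pvMv_le_of_mem (fun a => h (f a)) (List.mem_cons_self (a := a0) (l := rest)) 0
        rw [← hl] at h1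
        omega
      · exact ⟨a, ha, hae.symm⟩
    obtain ⟨astar, hastar⟩ : ∃ a, l.find? (fun a => h (f a) == M) = some a := by
      obtain ⟨a, ha, hae⟩ := hMattain
      exact Option.isSome_iff_exists.mp (List.find?_isSome.mpr ⟨a, ha, by simp [hae]⟩)
    have hastar_p := List.find?_some hastar
    have hastar_eq : h (f astar) = M := by simpa using hastar_p
    -- A side: the counter's items over the dedup'd keys
    have hitems : (PySem.Dict.counter (l.map f)).items
        = (PySem.Set.ofList (l.map f)).map (fun k => (k, h k)) := by
      have := PySem.Dict.items_counter (xs := l.map f)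
      simpa using this
    set ks : List String := PySem.Set.ofList (l.map f) with hks
    obtain ⟨k0, ks', hkscons⟩ : ∃ k0 ks', ks = k0 :: ks' := by
      cases hk : ks with
      | nil =>
        exfalso
        have hmem : f a0 ∈ ks := by
          rw [hks, PySem.Set.mem_ofList]
          exact List.mem_map_of_mem List.mem_cons_self
        rw [hk] at hmem
        simp at hmem
      | cons k0 ks' => exact ⟨k0, ks', rfl⟩
    have hitems' : (PySem.Dict.counter (l.map f)).items
        = (k0, h k0) :: ks'.map (fun k => (k, h k)) := by
      rw [hitems, hkscons, List.map_cons]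
    have hksmem : ∀ k, k ∈ ks ↔ k ∈ l.map f := by
      intro k
      rw [hks]
      exact PySem.Set.mem_ofList _ k
    have hk0mem : k0 ∈ l.map f := (hksmem k0).mp (by rw [hkscons]; exact List.mem_cons_self)
    have hk0pos : (0:Int) < h k0 := by
      have := List.count_pos_iff.mpr hk0mem
      simp only [hh]
      exact_mod_cast this
    -- the seeded running max over the keys equals M
    have hMA_eq : pvMv h (h k0) ks' = M := by
      apply le_antisymm
      · rcases pvMv_attains h (h k0) ks' with h0 | ⟨k, hk, hke⟩
        · obtain ⟨a, ha, hae⟩ := List.mem_map.mp hk0mem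
          have hle := pvMv_le_of_mem (fun a => h (f a)) ha 0
          rw [hae] at hle
          rw [h0]
          exact hle
        · have hkks : k ∈ ks := by rw [hkscons]; exact List.mem_cons_of_mem _ hk
          obtain ⟨a, ha, hae⟩ := List.mem_map.mp ((hksmem k).mp hkks)
          have hle := pvMv_le_of_mem (fun a => h (f a)) ha 0
          rw [hae] at hle
          rw [hke]
          exact hle
      · obtain ⟨a, ha, hae⟩ := hMattain
        have hfaks : f a ∈ ks := (hksmem (f a)).mpr (List.mem_map_of_mem ha)
        rw [hkscons] at hfaks
        rcases List.mem_cons.mp hfaks with heq | hmem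
        · rw [← hae, heq]
          exact pvMv_init h (h k0) ks'
        · rw [← hae]
          exact pvMv_le_of_mem h hmem (h k0)
    -- the first key of ks with count M is f astar
    have hks_all : ks.find? (fun k => h k == M) = some (f astar) := by
      have hset_find : ks.find? (fun k => h k == M) = (l.map f).find? (fun k => h k == M) := by
        rw [hks, PySem.Set.ofList]
        have := pvFind?_foldl_add (fun k => h k == M) (l.map f) []
        simpa [PySem.Set.empty] using this
      have hmap_find : (l.map f).find? (fun k => h k == M)
          = (l.find? (fun a => h (f a) == M)).map f := by
        rw [List.find?_map]
        rfl
      rw [hset_find, hmap_find, hastar]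
      rfl
    -- A's final rescan finds astar
    have hAfind : l.find? (fun a => f a == f astar) = some astar := by
      apply pvFind?_strengthen hastar
      · intro x _ hx
        have hfx : f x = f astar := by simpa using hx
        simp [hfx, hastar_eq]
      · simp
    -- assemble: B side
    rw [hfun, pvFoldRecord (fun a => h (f a)) l "" 0, hBfind, hastar]
    -- assemble: A side — reduce the winner to f astar
    rw [hitems', pvMaxCons, pvMaxFold_map, pvFoldRecord h ks' k0 (h k0)]
    by_cases hk0M : h k0 = M
    · have hnone : ks'.find? (fun k => decide (h k0 < h k) && (h k == pvMv h (h k0) ks')) = none := by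
        rw [List.find?_eq_none]
        intro k _
        rw [hMA_eq]
        by_cases hk : h k = M
        · have hnx : ¬ (h k0 < h k) := by omega
          simp [hnx]
        · simp [hk]
      have hk0astar : k0 = f astar := by
        rw [hkscons, List.find?_cons] at hks_all
        have hp : (h k0 == M) = true := by simp [hk0M]
        rw [hp] at hks_all
        simpa using hks_all
      rw [hnone]
      simp only [Option.elim]
      rw [hk0astar, hAfind]
    · have hk0lt : h k0 < M := by
        have := pvMv_init h (h k0) ks'
        omega
      have hcongA : ks'.find? (fun k => decide (h k0 < h k) && (h k == pvMv h (h k0) ks'))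
          = ks'.find? (fun k => h k == M) := by
        apply pvFind?_congr
        intro k _
        rw [hMA_eq]
        by_cases hk : h k = M
        · simp [hk, hk0lt]
        · have hfx : (h k == M) = false := beq_eq_false_iff_ne.mpr hk
          rw [hfx]
          simp
      have hks'some : ks'.find? (fun k => h k == M) = some (f astar) := by
        rw [hkscons, List.find?_cons] at hks_all
        have hp : (h k0 == M) = false := beq_eq_false_iff_ne.mpr hk0M
        rw [hp] at hks_all
        exact hks_all
      rw [hcongA, hks'some]
      simp only [Option.elim]
      rw [hAfind]
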